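-- pv_equiv track=rewrite | github.com/c0del1ar/ajasendiri | tools/ajasendiri_lsp.py | get_word_at
-- ===== SOURCE A (Python) =====
-- def get_word_at(text: str, line: int, char: int) -> str | None:
--     lines = text.splitlines()
--     if line < 0 or line >= len(lines):
--         return None
--     s = lines[line]
--     if not s:
--         return None
--     if char < 0:
--         char = 0
--     if char >= len(s):
--         char = len(s) - 1
--     if not (s[char].isalnum() or s[char] == "_"):
--         if char > 0 and (s[char - 1].isalnum() or s[char - 1] == "_"):
--             char -= 1
--         else:
--             return None
--
--     lo = char
--     hi = char
--     while lo > 0 and (s[lo - 1].isalnum() or s[lo - 1] == "_"):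
--         lo -= 1
--     while hi + 1 < len(s) and (s[hi + 1].isalnum() or s[hi + 1] == "_"):
--         hi += 1
--     return s[lo : hi + 1]
-- ===== SOURCE B (Python) =====
-- def get_word_at(text: str, line: int, char: int) -> str | None:
--     lines = text.splitlines()
--     if line < 0 or line >= len(lines):
--         return None
--     s = lines[line]
--     if not s:
--         return None
--     p = 0 if char < 0 else min(char, len(s) - 1)
--
--     def is_word(c):
--         return c.isalnum() or c == "_"
--
--     # one pass: collect maximal word runs as (start, end_exclusive) spans
--     spans = []
--     start = None
--     for i, c in enumerate(s):
--         if is_word(c):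
--             if start is None:
--                 start = i
--         elif start is not None:
--             spans.append((start, i))
--             start = None
--     if start is not None:
--         spans.append((start, len(s)))
--
--     # pick the span containing p, or the span ending exactly at p (one-step-left fallback)
--     for a, b in spans:
--         if a <= p < b or b == p:
--             return s[a:b]
--     return None
-- ===== Notes on version B (the rewrite author's own statement) =====
-- stated objective: alternative
-- what changed: Replaces the outward left/right index-expansion loops with a single scan that indexes the line into maximal word-run spans and then selects the span containing (or ending exactly at) the clamped position.
import Mathlib
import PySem

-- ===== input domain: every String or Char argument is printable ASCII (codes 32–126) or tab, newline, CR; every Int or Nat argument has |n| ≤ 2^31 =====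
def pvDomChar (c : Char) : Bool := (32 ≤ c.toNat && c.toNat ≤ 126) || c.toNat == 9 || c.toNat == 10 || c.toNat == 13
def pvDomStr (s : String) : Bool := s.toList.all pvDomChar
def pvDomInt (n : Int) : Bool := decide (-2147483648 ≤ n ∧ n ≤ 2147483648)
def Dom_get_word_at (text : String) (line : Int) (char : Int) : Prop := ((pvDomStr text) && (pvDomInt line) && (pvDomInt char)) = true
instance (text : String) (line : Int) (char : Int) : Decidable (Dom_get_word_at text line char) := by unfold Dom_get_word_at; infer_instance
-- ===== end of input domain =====

-- B replaces A's outward left/right expansion loops with a one-pass span index of the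
-- line plus span selection (objective: alternative decomposition, same cost).

-- ===== PORT A =====
-- c.isalnum() or c == "_"  (exact on the ASCII domain)
def wcA (c : Char) : Bool := PySem.Chars.isalnum c || c == '_'

-- while lo > 0 and wc(s[lo-1]): lo -= 1
def expandLo (s : List Char) : Nat → Nat
  | 0 => 0
  | lo + 1 => if wcA (s.getD lo ' ') then expandLo s lo else lo + 1

-- while hi + 1 < len(s) and wc(s[hi+1]): hi += 1
def expandHi (s : List Char) (hi : Nat) : Nat :=
  if h : hi + 1 < s.length ∧ wcA (s.getD (hi + 1) ' ') = true then expandHi s (hi + 1) else hi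
termination_by s.length - hi
decreasing_by omega

def get_word_at (text : String) (line : Int) (char : Int) : Option String :=
  let lines := PySem.Str.splitlines text
  if line < 0 ∨ (lines.length : Int) ≤ line then none
  else
    let s := (lines.getD line.toNat "").toList
    if s.isEmpty then none
    else
      let char1 : Int := if char < 0 then 0 else char
      let char2 : Int := if (s.length : Int) ≤ char1 then (s.length : Int) - 1 else char1
      let c : Nat := char2.toNat
      let q? : Option Nat :=
        if ¬ wcA (s.getD c ' ') = true then
          if 0 < c ∧ wcA (s.getD (c - 1) ' ') = true then some (c - 1) else none
        else some c
      match q? with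
      | none => none
      | some q =>
        let lo := expandLo s q
        let hi := expandHi s q
        some (String.mk (PySem.List.slice s (some (lo : Int)) (some ((hi : Int) + 1))))

-- ===== PORT B =====
def wcB (c : Char) : Bool := PySem.Chars.isalnum c || c == '_'

-- one pass over the line, collecting maximal word runs as (start, end_exclusive) spans
def spansAux (t : List Char) (i : Nat) (st : Option Nat) : List (Nat × Nat) :=
  match t with
  | [] => match st with | none => [] | some a => [(a, i)]
  | c :: rest =>
    if wcB c then
      spansAux rest (i + 1) (match st with | none => some i | some a => some a)
    else
      match st with
      | none => spansAux rest (i + 1) none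
      | some a => (a, i) :: spansAux rest (i + 1) none

def get_word_at_alt (text : String) (line : Int) (char : Int) : Option String :=
  let lines := PySem.Str.splitlines text
  if line < 0 ∨ (lines.length : Int) ≤ line then none
  else
    let s := (lines.getD line.toNat "").toList
    if s.isEmpty then none
    else
      let p : Nat := (if char < 0 then (0 : Int) else min char ((s.length : Int) - 1)).toNat
      match (spansAux s 0 none).find? (fun ab => (ab.1 ≤ p && p < ab.2) || ab.2 == p) with
      | none => none
      | some ab => some (String.mk (PySem.List.slice s (some (ab.1 : Int)) (some (ab.2 : Int))))

-- ===== PRECONDITION & SPEC =====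
def Spec_get_word_at (text : String) (line : Int) (char : Int) (out : Option String) : Prop := out = get_word_at_alt text line char
instance (text : String) (line : Int) (char : Int) (out : Option String) : Decidable (Spec_get_word_at text line char out) := by unfold Spec_get_word_at; infer_instance

-- ===== CLAIM (what is proved, stated in full; the proofs are below) =====
def Claim_equal_get_word_at : Prop := ∀ (text : String) (line : Int) (char : Int), Dom_get_word_at text line char → Spec_get_word_at text line char (get_word_at text line char)

-- ===== LEMMAS AND PROOFS =====

theorem wcB_eq : wcB = wcA := rfl

-- s.getD i ' ' picks the head of s.drop i
theorem getD_drop (s : List Char) (i : Nat) (c : Char) (r : List Char)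
    (h : s.drop i = c :: r) : s.getD i ' ' = c := by
  have h0 : s[i]? = some c := by
    have h2 := congrArg (fun l => l[0]?) h
    simpa [List.getElem?_drop] using h2
  simp [List.getD, h0]

theorem drop_succ_of_drop (s : List Char) (i : Nat) (c : Char) (r : List Char)
    (h : s.drop i = c :: r) : s.drop (i + 1) = r := by
  rw [← List.tail_drop, h]; rfl

theorem lt_length_of_drop (s : List Char) (i : Nat) (c : Char) (r : List Char)
    (h : s.drop i = c :: r) : i < s.length := by
  have := congrArg List.length h; simp at this; omega

-- a maximal word run of s, as (start, end_exclusive)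
def goodSpan (s : List Char) (a b : Nat) : Prop :=
  a < b ∧ b ≤ s.length ∧ (∀ j, a ≤ j → j < b → wcA (s.getD j ' ') = true) ∧
  (a = 0 ∨ wcA (s.getD (a - 1) ' ') = false) ∧ (b = s.length ∨ wcA (s.getD b ' ') = false)

-- loop invariant of spansAux at position i with pending-run state st
def SpInv (s : List Char) (i : Nat) : Option Nat → Prop
  | none => i ≤ s.length ∧ (i = 0 ∨ wcA (s.getD (i - 1) ' ') = false)
  | some a => i ≤ s.length ∧ a < i ∧ (∀ j, a ≤ j → j < i → wcA (s.getD j ' ') = true) ∧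
      (a = 0 ∨ wcA (s.getD (a - 1) ' ') = false)

theorem spansAux_sound (t : List Char) : ∀ (i : Nat) (st : Option Nat) (s : List Char),
    s.drop i = t → SpInv s i st → ∀ ab ∈ spansAux t i st, goodSpan s ab.1 ab.2 := by
  induction t with
  | nil =>
    intro i st s hdrop hinv ab hab
    have hlen : s.length ≤ i := by simpa using List.drop_eq_nil_iff.mp hdrop
    cases st with
    | none => simp [spansAux] at hab
    | some a =>
      simp [spansAux] at hab
      obtain ⟨hil, hai, hrun, hleft⟩ := hinv
      have hie : i = s.length := by omega
      subst hab
      exact ⟨by omega, by omega, fun j h1 h2 => hrun j h1 (by omega), hleft, Or.inl hie⟩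
  | cons c rest ih =>
    intro i st s hdrop hinv ab hab
    have hci : s.getD i ' ' = c := getD_drop s i c rest hdrop
    have hdrop' : s.drop (i + 1) = rest := drop_succ_of_drop s i c rest hdrop
    have hlt : i < s.length := lt_length_of_drop s i c rest hdrop
    cases st with
    | none =>
      obtain ⟨hil, hleft⟩ := hinv
      by_cases hwc : wcB c = true
      · simp only [spansAux, hwc, if_pos] at hab
        refine ih (i + 1) (some i) s hdrop' ?_ ab hab
        refine ⟨by omega, by omega, ?_, hleft⟩
        intro j h1 h2
        have : j = i := by omega
        subst this; rw [hci]; rw [wcB_eq] at hwc; exact hwc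
      · simp only [spansAux, hwc, if_neg, Bool.false_eq_true, not_false_iff] at hab
        refine ih (i + 1) none s hdrop' ?_ ab hab
        refine ⟨by omega, Or.inr ?_⟩
        simp only [Nat.add_sub_cancel, hci]
        rw [wcB_eq] at hwc; simpa using hwc
    | some a =>
      obtain ⟨hil, hai, hrun, hleft⟩ := hinv
      by_cases hwc : wcB c = true
      · simp only [spansAux, hwc, if_pos] at hab
        refine ih (i + 1) (some a) s hdrop' ?_ ab hab
        refine ⟨by omega, by omega, ?_, hleft⟩
        intro j h1 h2
        rcases Nat.lt_or_ge j i with h | h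
        · exact hrun j h1 h
        · have : j = i := by omega
          subst this; rw [hci]; rw [wcB_eq] at hwc; exact hwc
      · simp only [spansAux, hwc, Bool.false_eq_true, if_neg, not_false_iff, List.mem_cons] at hab
        rcases hab with hab | hab
        · subst hab
          refine ⟨by omega, by omega, fun j h1 h2 => hrun j h1 h2, hleft, Or.inr ?_⟩
          rw [hci]; rw [wcB_eq] at hwc; simpa using hwc
        · refine ih (i + 1) none s hdrop' ?_ ab hab
          refine ⟨by omega, Or.inr ?_⟩
          simp only [Nat.add_sub_cancel, hci]
          rw [wcB_eq] at hwc; simpa using hwc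

theorem spansAux_complete (t : List Char) : ∀ (i : Nat) (st : Option Nat) (s : List Char),
    s.drop i = t → SpInv s i st → ∀ a b, goodSpan s a b →
    (match st with | none => i ≤ a | some a0 => a = a0 ∨ i ≤ a) →
    (a, b) ∈ spansAux t i st := by
  induction t with
  | nil =>
    intro i st s hdrop hinv a b hgood hcond
    have hlen : s.length ≤ i := by simpa using List.drop_eq_nil_iff.mp hdrop
    obtain ⟨hab, hbl, hrun, hleftg, hrightg⟩ := hgood
    cases st with
    | none => simp only at hcond; omega
    | some a0 =>
      obtain ⟨hil, hai, hrunI, hleftI⟩ := hinv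
      simp only at hcond
      rcases hcond with rfl | h
      · -- b must be i = s.length
        have hie : i = s.length := by omega
        have hb : b = i := by
          by_contra hne
          rcases Nat.lt_or_ge b i with hlt | hge
          · have : wcA (s.getD b ' ') = true := hrunI b (by omega) hlt
            rcases hrightg with h1 | h1
            · omega
            · rw [h1] at this; simp at this
          · omega
        subst hb; simp [spansAux]
      · omega
  | cons c rest ih =>
    intro i st s hdrop hinv a b hgood hcond
    have hci : s.getD i ' ' = c := getD_drop s i c rest hdrop
    have hdrop' : s.drop (i + 1) = rest := drop_succ_of_drop s i c rest hdrop
    have hlt : i < s.length := lt_length_of_drop s i c rest hdrop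
    obtain ⟨hab, hbl, hrun, hleftg, hrightg⟩ := hgood
    have hgood' : goodSpan s a b := ⟨hab, hbl, hrun, hleftg, hrightg⟩
    cases st with
    | none =>
      obtain ⟨hil, hleftI⟩ := hinv
      simp only at hcond
      by_cases hwc : wcB c = true
      · simp only [spansAux, hwc, if_pos]
        refine ih (i + 1) (some i) s hdrop' ⟨by omega, by omega, ?_, hleftI⟩ a b hgood' ?_
        · intro j h1 h2
          have : j = i := by omega
          subst this; rw [hci]; rw [wcB_eq] at hwc; exact hwc
        · simp only
          omega
      · simp only [spansAux, hwc, Bool.false_eq_true, if_neg, not_false_iff]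
        have hai' : i + 1 ≤ a := by
          rcases Nat.eq_or_lt_of_le hcond with h | h
          · exfalso
            have : wcA (s.getD a ' ') = true := hrun a (le_refl a) hab
            rw [← h, hci] at this; rw [wcB_eq] at hwc; rw [this] at hwc; simp at hwc
          · omega
        refine ih (i + 1) none s hdrop' ⟨by omega, Or.inr ?_⟩ a b hgood' hai'
        simp only [Nat.add_sub_cancel, hci]
        rw [wcB_eq] at hwc; simpa using hwc
    | some a0 =>
      obtain ⟨hil, hai, hrunI, hleftI⟩ := hinv
      simp only at hcond
      by_cases hwc : wcB c = true
      · simp only [spansAux, hwc, if_pos]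
        refine ih (i + 1) (some a0) s hdrop' ⟨by omega, by omega, ?_, hleftI⟩ a b hgood' ?_
        · intro j h1 h2
          rcases Nat.lt_or_ge j i with h | h
          · exact hrunI j h1 h
          · have : j = i := by omega
            subst this; rw [hci]; rw [wcB_eq] at hwc; exact hwc
        · simp only
          rcases hcond with rfl | h
          · exact Or.inl rfl
          · rcases Nat.eq_or_lt_of_le h with h2 | h2
            · exfalso
              -- a = i : left boundary of (a,b) says ¬wc s[a-1], but s[i-1] is in a0's run
              have hwprev : wcA (s.getD (i - 1) ' ') = true := hrunI (i - 1) (by omega) (by omega)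
              rcases hleftg with h3 | h3
              · omega
              · rw [h2] at hwprev; rw [hwprev] at h3; simp at h3
            · omega
      · simp only [spansAux, hwc, Bool.false_eq_true, if_neg, not_false_iff]
        rcases hcond with rfl | h
        · -- target span is the pending run; its end must be i
          have hb : b = i := by
            by_contra hne
            rcases Nat.lt_or_ge b i with hlt2 | hge
            · have : wcA (s.getD b ' ') = true := hrunI b (by omega) hlt2
              rcases hrightg with h1 | h1
              · omega
              · rw [h1] at this; simp at this
            · have hib : i < b := by omega
              have : wcA (s.getD i ' ') = true := hrun i (by omega) hib
              rw [hci] at this; rw [wcB_eq] at hwc; rw [this] at hwc; simp at hwc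
          subst hb; exact List.mem_cons_self
        · have hai' : i + 1 ≤ a := by
            rcases Nat.eq_or_lt_of_le h with h2 | h2
            · exfalso
              have : wcA (s.getD a ' ') = true := hrun a (le_refl a) hab
              rw [← h2, hci] at this; rw [wcB_eq] at hwc; rw [this] at hwc; simp at hwc
            · omega
          refine List.mem_cons_of_mem _ (ih (i + 1) none s hdrop' ⟨by omega, Or.inr ?_⟩ a b hgood' hai')
          simp only [Nat.add_sub_cancel, hci]
          rw [wcB_eq] at hwc; simpa using hwc

-- two maximal runs sharing an index coincide
theorem goodSpan_unique (s : List Char) (a b a' b' j : Nat)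
    (h1 : goodSpan s a b) (h2 : goodSpan s a' b')
    (hj1 : a ≤ j) (hj2 : j < b) (hj3 : a' ≤ j) (hj4 : j < b') : a = a' ∧ b = b' := by
  obtain ⟨hab, hbl, hrun, hleft, hright⟩ := h1
  obtain ⟨hab', hbl', hrun', hleft', hright'⟩ := h2
  constructor
  · rcases lt_trichotomy a a' with h | h | h
    · exfalso
      have hw : wcA (s.getD (a' - 1) ' ') = true := hrun (a' - 1) (by omega) (by omega)
      rcases hleft' with h3 | h3
      · omega
      · rw [hw] at h3; simp at h3
    · exact h
    · exfalso
      have hw : wcA (s.getD (a - 1) ' ') = true := hrun' (a - 1) (by omega) (by omega)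
      rcases hleft with h3 | h3
      · omega
      · rw [hw] at h3; simp at h3
  · rcases lt_trichotomy b b' with h | h | h
    · exfalso
      have hw : wcA (s.getD b ' ') = true := hrun' b (by omega) (by omega)
      rcases hright with h3 | h3
      · omega
      · rw [hw] at h3; simp at h3
    · exact h
    · exfalso
      have hw : wcA (s.getD b' ' ') = true := hrun b' (by omega) (by omega)
      rcases hright' with h3 | h3
      · omega
      · rw [hw] at h3; simp at h3

theorem find?_unique {α : Type} (P : α → Bool) (l : List α) (x : α)
    (hx : x ∈ l) (hP : P x = true) (hu : ∀ y ∈ l, P y = true → y = x) :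
    l.find? P = some x := by
  induction l with
  | nil => simp at hx
  | cons c rest ih =>
    rcases List.mem_cons.mp hx with rfl | hmem
    · simp [List.find?, hP]
    · by_cases hc : P c = true
      · have : c = x := hu c List.mem_cons_self hc
        subst this; simp [List.find?, hc]
      · simp only [List.find?]
        rw [Bool.of_not_eq_true hc]
        exact ih hmem (fun y hy => hu y (List.mem_cons_of_mem _ hy))

theorem expandLo_spec (s : List Char) (q : Nat) (h : wcA (s.getD q ' ') = true) :
    expandLo s q ≤ q ∧ (∀ j, expandLo s q ≤ j → j ≤ q → wcA (s.getD j ' ') = true) ∧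
    (expandLo s q = 0 ∨ wcA (s.getD (expandLo s q - 1) ' ') = false) := by
  induction q with
  | zero =>
    refine ⟨le_refl 0, ?_, Or.inl rfl⟩
    intro j h1 h2
    have : j = 0 := by omega
    subst this; exact h
  | succ k ih =>
    by_cases hk : wcA (s.getD k ' ') = true
    · obtain ⟨hle, hrun, hleft⟩ := ih hk
      rw [expandLo, if_pos hk]
      refine ⟨by omega, ?_, hleft⟩
      intro j h1 h2
      rcases Nat.lt_or_ge j (k + 1) with h3 | h3
      · exact hrun j h1 (by omega)
      · have : j = k + 1 := by omega
        subst this; exact h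
    · rw [expandLo, if_neg hk]
      refine ⟨le_refl _, ?_, Or.inr ?_⟩
      · intro j h1 h2
        have : j = k + 1 := by omega
        subst this; exact h
      · simpa using Bool.of_not_eq_true hk

theorem expandHi_spec (s : List Char) : ∀ (fuel hi : Nat), s.length - hi ≤ fuel →
    wcA (s.getD hi ' ') = true → hi < s.length →
    hi ≤ expandHi s hi ∧ expandHi s hi < s.length ∧
    (∀ j, hi ≤ j → j ≤ expandHi s hi → wcA (s.getD j ' ') = true) ∧
    (expandHi s hi + 1 = s.length ∨ wcA (s.getD (expandHi s hi + 1) ' ') = false) := by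
  intro fuel
  induction fuel with
  | zero => intro hi h1 _ h3; omega
  | succ f ih =>
    intro hi hfuel hwc hlt
    by_cases hcond : hi + 1 < s.length ∧ wcA (s.getD (hi + 1) ' ') = true
    · rw [expandHi, dif_pos hcond]
      obtain ⟨hle, hltl, hrun, hright⟩ := ih (hi + 1) (by omega) hcond.2 hcond.1
      refine ⟨by omega, hltl, ?_, hright⟩
      intro j h1 h2
      rcases Nat.eq_or_lt_of_le h1 with h3 | h3
      · rw [← h3]; exact hwc
      · exact hrun j (by omega) h2
    · rw [expandHi, dif_neg hcond]
      refine ⟨le_refl _, hlt, ?_, ?_⟩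
      · intro j h1 h2
        have : j = hi := by omega
        subst this; exact hwc
      · rcases Nat.lt_or_ge (hi + 1) s.length with h3 | h3
        · right
          cases h4 : wcA (s.getD (hi + 1) ' ') with
          | false => rfl
          | true => exact absurd ⟨h3, h4⟩ hcond
        · left; omega

theorem goodSpan_expand (s : List Char) (q : Nat) (hq : q < s.length)
    (hw : wcA (s.getD q ' ') = true) :
    goodSpan s (expandLo s q) (expandHi s q + 1) ∧ expandLo s q ≤ q ∧ q ≤ expandHi s q := by
  obtain ⟨hlo_le, hlo_run, hlo_left⟩ := expandLo_spec s q hw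
  obtain ⟨hhi_le, hhi_lt, hhi_run, hhi_right⟩ := expandHi_spec s (s.length - q) q (le_refl _) hw hq
  refine ⟨⟨by omega, by omega, ?_, hlo_left, ?_⟩, hlo_le, hhi_le⟩
  · intro j h1 h2
    rcases Nat.lt_or_ge j q with h3 | h3
    · exact hlo_run j h1 (by omega)
    · exact hhi_run j h3 (by omega)
  · rcases hhi_right with h3 | h3
    · exact Or.inl h3
    · exact Or.inr h3

-- full characterisation of B's span lookup in terms of A's expansion
theorem find_span (s : List Char) (p : Nat) (hp : p < s.length) :
    (spansAux s 0 none).find? (fun ab => (ab.1 ≤ p && p < ab.2) || ab.2 == p) =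
    (if wcA (s.getD p ' ') = true then some (expandLo s p, expandHi s p + 1)
     else if 0 < p ∧ wcA (s.getD (p - 1) ' ') = true then
       some (expandLo s (p - 1), expandHi s (p - 1) + 1)
     else none) := by
  have hinv0 : SpInv s 0 none := ⟨Nat.zero_le _, Or.inl rfl⟩
  have hsound := spansAux_sound s 0 none s (by simp) hinv0
  by_cases hw : wcA (s.getD p ' ') = true
  · rw [if_pos hw]
    obtain ⟨hgood, hlo, hhi⟩ := goodSpan_expand s p hp hw
    apply find?_unique
    · exact spansAux_complete s 0 none s (by simp) hinv0 _ _ hgood (Nat.zero_le _)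
    · simp only [Bool.or_eq_true, Bool.and_eq_true, decide_eq_true_eq]
      exact Or.inl ⟨by simpa using hlo, by simp; omega⟩
    · intro y hy hPy
      have hgy := hsound y hy
      simp only [Bool.or_eq_true, Bool.and_eq_true, decide_eq_true_eq, beq_iff_eq] at hPy
      rcases hPy with ⟨h1, h2⟩ | h1
      · have := goodSpan_unique s y.1 y.2 (expandLo s p) (expandHi s p + 1) p hgy hgood
          (by simpa using h1) (by simpa using h2) hlo (by omega)
        exact Prod.ext this.1 this.2
      · exfalso
        obtain ⟨hab, hbl, hrun, _, hright⟩ := hgy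
        rcases hright with h3 | h3
        · rw [h1] at h3; omega
        · rw [h1] at h3; rw [hw] at h3; simp at h3
  · rw [if_neg hw]
    by_cases hprev : 0 < p ∧ wcA (s.getD (p - 1) ' ') = true
    · rw [if_pos hprev]
      obtain ⟨hp0, hwp⟩ := hprev
      obtain ⟨hgood, hlo, hhi⟩ := goodSpan_expand s (p - 1) (by omega) hwp
      -- the run through p-1 ends exactly at p
      have hend : expandHi s (p - 1) = p - 1 := by
        rw [expandHi]
        rw [dif_neg]
        intro hcl
        rw [show p - 1 + 1 = p from by omega] at hcl
        rw [hcl.2] at hw; simp at hw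
      apply find?_unique
      · exact spansAux_complete s 0 none s (by simp) hinv0 _ _ hgood (Nat.zero_le _)
      · simp only [Bool.or_eq_true, Bool.and_eq_true, decide_eq_true_eq, beq_iff_eq]
        right; simp [hend]; omega
      · intro y hy hPy
        have hgy := hsound y hy
        simp only [Bool.or_eq_true, Bool.and_eq_true, decide_eq_true_eq, beq_iff_eq] at hPy
        rcases hPy with ⟨h1, h2⟩ | h1
        · exfalso
          have : wcA (s.getD p ' ') = true := hgy.2.2.1 p h1 h2
          rw [this] at hw; simp at hw
        · have hyab : y.1 < y.2 := hgy.1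
          have := goodSpan_unique s y.1 y.2 (expandLo s (p - 1)) (expandHi s (p - 1) + 1)
            (p - 1) hgy hgood (by omega) (by omega) hlo (by omega)
          exact Prod.ext this.1 this.2
    · rw [if_neg hprev]
      rw [List.find?_eq_none]
      intro y hy
      have hgy := hsound y hy
      simp only [Bool.or_eq_true, Bool.and_eq_true, decide_eq_true_eq, beq_iff_eq, not_or,
        not_and, not_lt]
      obtain ⟨hab, hbl, hrun, hleft, hright⟩ := hgy
      constructor
      · intro h1
        by_contra h2
        have : wcA (s.getD p ' ') = true := hrun p h1 (by omega)
        rw [this] at hw; simp at hw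
      · intro h1
        -- y.2 = p : then p > 0 and s[p-1] is a word char, contradicting hprev
        have hp0 : 0 < p := by omega
        have : wcA (s.getD (p - 1) ' ') = true := hrun (p - 1) (by omega) (by omega)
        exact hprev ⟨hp0, this⟩

theorem core_eq (s : List Char) (char : Int) (hne : s ≠ []) :
    (let char1 : Int := if char < 0 then 0 else char
     let char2 : Int := if (s.length : Int) ≤ char1 then (s.length : Int) - 1 else char1
     let c : Nat := char2.toNat
     let q? : Option Nat :=
       if ¬ wcA (s.getD c ' ') = true then
         if 0 < c ∧ wcA (s.getD (c - 1) ' ') = true then some (c - 1) else none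
       else some c
     match q? with
     | none => none
     | some q =>
       let lo := expandLo s q
       let hi := expandHi s q
       some (String.mk (PySem.List.slice s (some (lo : Int)) (some ((hi : Int) + 1))))) =
    (let p : Nat := (if char < 0 then (0 : Int) else min char ((s.length : Int) - 1)).toNat
     match (spansAux s 0 none).find? (fun ab => (ab.1 ≤ p && p < ab.2) || ab.2 == p) with
     | none => none
     | some ab => some (String.mk (PySem.List.slice s (some (ab.1 : Int)) (some (ab.2 : Int))))) := by
  have hlen : 0 < s.length := List.length_pos_iff.mpr hne
  simp only
  have hc : ((if (s.length : Int) ≤ (if char < 0 then (0 : Int) else char) then (s.length : Int) - 1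
      else if char < 0 then (0 : Int) else char).toNat)
      = (if char < 0 then (0 : Int) else min char ((s.length : Int) - 1)).toNat := by
    split_ifs <;> omega
  rw [← hc]
  set p : Nat := ((if (s.length : Int) ≤ (if char < 0 then (0 : Int) else char) then (s.length : Int) - 1
      else if char < 0 then (0 : Int) else char).toNat) with hp
  have hplt : p < s.length := by
    rw [hp]; split_ifs <;> omega
  rw [find_span s p hplt]
  by_cases hw : wcA (s.getD p ' ') = true
  · rw [if_pos hw, if_neg (not_not_intro hw)]
    simp only
    congr 2
  · rw [if_neg hw, if_pos hw]
    by_cases hprev : 0 < p ∧ wcA (s.getD (p - 1) ' ') = true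
    · rw [if_pos hprev, if_pos hprev]
      simp only
      congr 2
    · rw [if_neg hprev, if_neg hprev]

-- ===== VERDICT (by name: the statement is the Claim_ definition above) =====
theorem get_word_at_spec : Claim_equal_get_word_at := by
  unfold Claim_equal_get_word_at Spec_get_word_at
  intro text line char _
  unfold get_word_at get_word_at_alt
  by_cases hg : line < 0 ∨ (((PySem.Str.splitlines text).length : Int) ≤ line)
  · simp only [if_pos hg]
  · simp only [if_neg hg]
    by_cases he : ((PySem.Str.splitlines text).getD line.toNat "").toList.isEmpty
    · simp only [if_pos he]
    · simp only [if_neg he]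
      exact core_eq _ char (by simpa [List.isEmpty_iff] using he)
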